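-- pv_equiv track=rewrite | github.com/codeiiest-dev/root-access-2023 | Crypto/Winner-winner/Private/solution.py | rational_to_contfrac
-- ===== SOURCE A (Python) =====
-- def rational_to_contfrac(x,y):
--     '''
--     Converts a rational x/y fraction into
--     a list of partial quotients [a0, ..., an]
--     '''
--     a = x//y
--     pquotients = [a]
--     while a * y != x:
--         x,y = y,x-a*y
--         a = x//y
--         pquotients.append(a)
--     return pquotients
-- ===== SOURCE B (Python) =====
-- def rational_to_contfrac(x, y):
--     a = x // y
--     if a * y == x:
--         return [a]
--     return [a] + rational_to_contfrac(y, x - a * y)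
-- ===== Notes on version B (the rewrite author's own statement) =====
-- stated objective: simpler
-- what changed: Replaces the while-loop with mutable reassignment and list append by direct recursion on the Euclidean pair (y, x-a*y), building the quotient list by concatenation.
import Mathlib
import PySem

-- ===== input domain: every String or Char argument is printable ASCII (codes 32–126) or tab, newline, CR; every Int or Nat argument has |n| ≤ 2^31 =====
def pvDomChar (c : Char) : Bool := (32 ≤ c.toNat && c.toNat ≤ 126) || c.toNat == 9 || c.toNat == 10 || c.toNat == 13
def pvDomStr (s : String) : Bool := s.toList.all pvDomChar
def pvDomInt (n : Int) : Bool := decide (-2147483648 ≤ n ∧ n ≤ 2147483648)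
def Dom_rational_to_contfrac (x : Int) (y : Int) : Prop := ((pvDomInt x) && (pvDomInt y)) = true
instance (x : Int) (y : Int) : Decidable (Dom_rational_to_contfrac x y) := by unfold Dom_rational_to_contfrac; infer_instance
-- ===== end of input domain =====

-- B replaces A's while-loop with mutable reassignment and append by direct recursion on the
-- Euclidean pair (y, x - a*y); same cost, simpler decomposition.

-- ===== PORT A =====
-- A's while-loop: state (x, y, a, pquotients); the fuel parameter is a totality guard only
-- (|y| strictly decreases each iteration, so fuel = |y| at entry is never exhausted).
def rationalToContfracLoopA : Nat → Int → Int → Int → List Int → List Int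
  | 0, _, _, _, acc => acc
  | fuel + 1, x, y, a, acc =>
    if a * y = x then acc
    else
      let x' := y
      let y' := x - a * y
      let a' := PySem.Int.floordiv x' y'
      rationalToContfracLoopA fuel x' y' a' (acc ++ [a'])

def rational_to_contfrac (x : Int) (y : Int) : List Int :=
  let a := PySem.Int.floordiv x y
  rationalToContfracLoopA y.natAbs x y a [a]

-- ===== PORT B =====
-- B's recursion; the fuel parameter is a totality guard only (never exhausted for y ≠ 0).
def rationalToContfracGoB : Nat → Int → Int → List Int
  | 0, _, _ => []
  | fuel + 1, x, y =>
    let a := PySem.Int.floordiv x y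
    if a * y = x then [a]
    else [a] ++ rationalToContfracGoB fuel y (x - a * y)

def rational_to_contfrac_alt (x : Int) (y : Int) : List Int :=
  rationalToContfracGoB (y.natAbs + 1) x y

-- ===== PRECONDITION & SPEC =====
-- A raises ZeroDivisionError iff y = 0 (x // y at entry); inner divisors are never 0.
def Pre_rational_to_contfrac (x : Int) (y : Int) : Prop := y ≠ 0
instance (x : Int) (y : Int) : Decidable (Pre_rational_to_contfrac x y) := by
  unfold Pre_rational_to_contfrac; infer_instance

def pvWitness_rational_to_contfrac : Int × Int := (7, 3)

def Spec_rational_to_contfrac (x : Int) (y : Int) (out : List Int) : Prop := out = rational_to_contfrac_alt x y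
instance (x : Int) (y : Int) (out : List Int) : Decidable (Spec_rational_to_contfrac x y out) := by
  unfold Spec_rational_to_contfrac; infer_instance

-- ===== CLAIM (what is proved, stated in full; the proofs are below) =====
def Claim_equal_rational_to_contfrac : Prop := ∀ (x : Int) (y : Int), Dom_rational_to_contfrac x y → Pre_rational_to_contfrac x y → Spec_rational_to_contfrac x y (rational_to_contfrac x y)

-- ===== LEMMAS AND PROOFS =====

-- the Euclidean remainder shrinks in absolute value
lemma remainder_natAbs_lt (x y : Int) (hy : y ≠ 0) :
    (x - PySem.Int.floordiv x y * y).natAbs < y.natAbs := by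
  have h := PySem.Int.floordiv_mul_add_mod x y
  have hr : x - PySem.Int.floordiv x y * y = PySem.Int.mod x y := by omega
  rw [hr]
  rcases lt_or_gt_of_ne hy with hneg | hpos
  · have h1 := PySem.Int.mod_neg_bounds x hneg
    omega
  · have h1 := PySem.Int.mod_nonneg x hpos
    have h2 := PySem.Int.mod_lt x hpos
    omega

-- the loop of A, started after the first quotient, produces B's recursion appended to the accumulator
lemma loopA_eq_goB (fuel : Nat) : ∀ (x y : Int), y ≠ 0 → y.natAbs ≤ fuel →
    ∀ acc : List Int,
      rationalToContfracLoopA fuel x y (PySem.Int.floordiv x y) (acc ++ [PySem.Int.floordiv x y])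
        = acc ++ rationalToContfracGoB (fuel + 1) x y := by
  induction fuel with
  | zero => intro x y hy hle acc; omega
  | succ n ih =>
    intro x y hy hle acc
    simp only [rationalToContfracLoopA, rationalToContfracGoB]
    by_cases h : PySem.Int.floordiv x y * y = x
    · simp [h]
    · simp only [if_neg h]
      have hr0 : x - PySem.Int.floordiv x y * y ≠ 0 := by
        intro h0; exact h (by omega)
      have hlt := remainder_natAbs_lt x y hy
      have := ih y (x - PySem.Int.floordiv x y * y) hr0 (by omega)
        (acc ++ [PySem.Int.floordiv x y])
      simpa using this

-- ===== VERDICT (by name: the statement is the Claim_ definition above) =====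
theorem rational_to_contfrac_spec : Claim_equal_rational_to_contfrac := by
  intro x y _ hy
  unfold Spec_rational_to_contfrac rational_to_contfrac rational_to_contfrac_alt
  have h := loopA_eq_goB y.natAbs x y hy (le_refl _) []
  simpa using h
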